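-- pv_equiv track=rewrite | github.com/DTaa2105ta/CMU-15-112 | week 5/hw5.py | isKingsTour
-- ===== SOURCE A (Python) =====
-- def makeNoneRow(colLen):
--     return [None] * (colLen + 2)
--
-- def makeFullBoard(board):
--     ans = [ ]
--     rowLen = len(board)
--     colLen = len(board[0])
--     for row in range(rowLen):
--         rowToAns = board[row].copy()
--         ans.append([None] + rowToAns + [None])
--     noneRow1 = [makeNoneRow(colLen)]
--     noneRow2 = [makeNoneRow(colLen)]
--     return noneRow1 + ans + noneRow2
--
-- def makeCheckedList(board):
--     ans = [ ]
--     colLen = len(board[0])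
--     for _ in range(len(board)):
--         rowToAdd = [0] * colLen
--         ans.append(rowToAdd)
--     return ans
--
-- def find1(board):
--     #find position of 1
--     flag = False
--     rowOf1, colOf1 = None, None
--     for row in range(len(board)):
--         for col in range(len(board[0])):
--             if board[row][col] == 0:
--                 return
--             elif board[row][col] == 1:
--                 if not flag:
--                     flag = True
--                     rowOf1, colOf1 = row, col
--                 elif flag:
--                     return
--     return rowOf1, colOf1
--
-- def check(element1, element2):
--     if element2 == None:
--         return False
--     return element2 - element1 == 1
--
-- def findNextmove(point, rowP, colP, newBoard, checkedList):
--     rowP += 1 # in full board with "None"s, increase current row,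
--     colP += 1 # col indices of the point
--     for col in range(colP - 1, colP + 1 + 1):
--         if check(point, newBoard[rowP-1][col]):
--             nextPRow = (rowP - 1) - 1
--             nextPCol = col - 1
--             if checkedList[nextPRow][nextPCol] == 0:
--                 return nextPRow, nextPCol
--     for col in range(colP - 1, colP + 1 + 1, 2):
--         if check(point, newBoard[rowP][col]):
--             nextPRow = (rowP) - 1
--             nextPCol = col - 1
--             if checkedList[nextPRow][nextPCol] == 0:
--                 return nextPRow, nextPCol
--     for col in range(colP - 1, colP + 1 + 1):
--         if check(point, newBoard[rowP+1][col]):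
--             nextPRow = (rowP + 1) - 1
--             nextPCol = col - 1
--             if checkedList[nextPRow][nextPCol] == 0:
--                 return nextPRow, nextPCol
--     return None, None
--
-- def isKingsTour(board):
--     if find1(board) == None: return False
--     else:
--         pRow, pCol = find1(board)
--
--     size = len(board)
--
--     checkedList = makeCheckedList(board)
--     point = board[pRow][pCol]
--     checkedList[pRow][pCol] = 1
--
--     newBoard = makeFullBoard(board)
--
--     while True:
--         nextPRow, nextPCol = findNextmove(point, pRow, pCol,
--                                           newBoard, checkedList)
--         if nextPRow != None and nextPCol != None:
--             checkedList[nextPRow][nextPCol] = 1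
--             pRow = nextPRow
--             pCol = nextPCol
--             point = board[pRow][pCol]
--             if point == size ** 2:
--                 break
--         else:
--             return False
--     return True
-- ===== SOURCE B (Python) =====
-- def isKingsTour(board):
--     cols = len(board[0])
--     pos = {}
--     for r in range(len(board)):
--         row = board[r]
--         for c in range(cols):
--             pos.setdefault(row[c], []).append((r, c))
--     if 0 in pos or len(pos.get(1, [])) != 1:
--         return False
--     (r, c) = pos[1][0]
--     v = 1
--     target = len(board) ** 2
--     while True:
--         nxt = None
--         for (nr, nc) in pos.get(v + 1, []):
--             if abs(nr - r) <= 1 and abs(nc - c) <= 1: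
--                 nxt = (nr, nc)
--                 break
--         if nxt is None:
--             return False
--         r, c = nxt
--         v += 1
--         if v == target:
--             return True
-- ===== Notes on version B (the rewrite author's own statement) =====
-- stated objective: alternative
-- what changed: B inverts A's search: instead of padding the board with None rows, keeping a visited matrix and probing the 8 neighbours of the current cell for value v+1 at every step, B builds once an inverted index (dict value -> list of positions in row-major order) which also replaces find1's flag scan (validity = no key 0 and exactly one position for key 1), and each step of the walk looks up the positions of v+1 and takes the first one Chebyshev-adjacent to the current cell; …
-- outside the precondition, e.g. on isKingsTour([[2], [0, 5]]): A returns False, B returns False; on isKingsTour([[0], []]): A returns False, B raises IndexError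
import Mathlib
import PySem

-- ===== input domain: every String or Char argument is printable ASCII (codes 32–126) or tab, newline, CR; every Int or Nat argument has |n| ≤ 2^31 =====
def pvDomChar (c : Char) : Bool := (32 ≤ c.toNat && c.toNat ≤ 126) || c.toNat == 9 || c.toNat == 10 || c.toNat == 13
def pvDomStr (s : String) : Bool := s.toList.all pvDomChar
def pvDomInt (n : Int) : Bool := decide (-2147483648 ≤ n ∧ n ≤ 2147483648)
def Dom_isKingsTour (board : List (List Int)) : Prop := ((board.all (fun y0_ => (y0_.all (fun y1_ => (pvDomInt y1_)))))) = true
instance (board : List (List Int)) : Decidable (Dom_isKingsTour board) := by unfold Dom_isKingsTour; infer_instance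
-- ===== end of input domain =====

-- B replaces A's padded None-board, visited matrix and neighbour probing by an inverted
-- index (value -> positions); return-value equivalence only (neither mutates its argument).

-- ===== PORT A =====
-- shared low-level indexing helpers (Python xs[i] with in-range indices)
def pvAtI (xs : List Int) (j : Int) : Int := PySem.List.pyGetD xs j 0
def pvAtO (xs : List (Option Int)) (j : Int) : Option Int := PySem.List.pyGetD xs j none
def pvRow (m : List (List Int)) (i : Int) : List Int := PySem.List.pyGetD m i []
def pvRowO (m : List (List (Option Int))) (i : Int) : List (Option Int) := PySem.List.pyGetD m i []
def pvGet2 (m : List (List Int)) (i j : Int) : Int := pvAtI (pvRow m i) j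
def pvSet1 (xs : List Int) (j : Int) (v : Int) : List Int :=
  xs.mapIdx (fun k x => if (k : Int) = j then v else x)
def pvSet2 (m : List (List Int)) (i j : Int) (v : Int) : List (List Int) :=
  m.mapIdx (fun k row => if (k : Int) = i then pvSet1 row j v else row)

def makeNoneRow (colLen : Nat) : List (Option Int) := List.replicate (colLen + 2) none

def makeFullBoard (board : List (List Int)) : List (List (Option Int)) :=
  [makeNoneRow (board.headD []).length]
    ++ board.map (fun row => [none] ++ row.map some ++ [none])
    ++ [makeNoneRow (board.headD []).length]

def makeCheckedList (board : List (List Int)) : List (List Int) :=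
  board.map (fun _ => List.replicate (board.headD []).length 0)

def checkA (e1 : Int) (e2 : Option Int) : Bool :=
  match e2 with
  | none => false
  | some v => v - e1 == 1

-- one of findNextmove's three 'for col in range(...)' loops
def scanColsA (point : Int) (nbRow : List (Option Int)) (outRow : Int)
    (checked : List (List Int)) : List Int → Option (Int × Int)
  | [] => none
  | c :: rest =>
    if checkA point (pvAtO nbRow c) = true ∧ pvGet2 checked outRow (c - 1) = 0
    then some (outRow, c - 1)
    else scanColsA point nbRow outRow checked rest

def findNextmove (point pRow pCol : Int) (newBoard : List (List (Option Int)))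
    (checked : List (List Int)) : Option (Int × Int) :=
  let rowP := pRow + 1
  let colP := pCol + 1
  match scanColsA point (pvRowO newBoard (rowP - 1)) (rowP - 1 - 1) checked [colP - 1, colP, colP + 1] with
  | some p => some p
  | none =>
    match scanColsA point (pvRowO newBoard rowP) (rowP - 1) checked [colP - 1, colP + 1] with
    | some p => some p
    | none => scanColsA point (pvRowO newBoard (rowP + 1)) (rowP + 1 - 1) checked [colP - 1, colP, colP + 1]

-- find1's nested scan; state = (flag, rowOf1, colOf1); none = Python's early 'return' (None)
def find1Cols (row : Int) : List Int → Int → (Bool × Option Int × Option Int) → Option (Bool × Option Int × Option Int)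
  | [], _, st => some st
  | v :: rest, col, st =>
    if v = 0 then none
    else if v = 1 then
      if st.1 = false then find1Cols row rest (col + 1) (true, some row, some col)
      else none
    else find1Cols row rest (col + 1) st

def find1Rows (cols : Nat) : List (List Int) → Int → (Bool × Option Int × Option Int) → Option (Bool × Option Int × Option Int)
  | [], _, st => some st
  | r :: rest, row, st =>
    match find1Cols row (r.take cols) 0 st with
    | none => none
    | some st' => find1Rows cols rest (row + 1) st'

def find1 (board : List (List Int)) : Option (Option Int × Option Int) :=
  match find1Rows (board.headD []).length board 0 (false, none, none) with
  | none => none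
  | some (_, r1, c1) => some (r1, c1)

-- the 'while True' walk; fuel bounds the iterations (each one marks a fresh cell)
def tourLoopA (board : List (List Int)) (newBoard : List (List (Option Int))) (size : Int) :
    Nat → Int → Int → Int → List (List Int) → Bool
  | 0, _, _, _, _ => false
  | fuel + 1, point, pRow, pCol, checked =>
    match findNextmove point pRow pCol newBoard checked with
    | none => false
    | some (nr, nc) =>
      let checked' := pvSet2 checked nr nc 1
      let point' := pvGet2 board nr nc
      if point' = size * size then true
      else tourLoopA board newBoard size fuel point' nr nc checked'

def isKingsTour (board : List (List Int)) : Bool :=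
  match find1 board with
  | none => false
  | some (some pRow, some pCol) =>
    let size : Int := board.length
    let checked := pvSet2 (makeCheckedList board) pRow pCol 1
    let point := pvGet2 board pRow pCol
    tourLoopA board (makeFullBoard board) size (board.length * (board.headD []).length + 1) point pRow pCol checked
  | some _ => false

-- ===== PORT B =====
-- one scan building the inverted index: value -> list of its positions in row-major order
def bScanRow (r : Int) : List Int → Int → PySem.Dict Int (List (Int × Int)) → PySem.Dict Int (List (Int × Int))
  | [], _, d => d
  | v :: rest, c, d => bScanRow r rest (c + 1) (d.modify v [] (fun l => l ++ [(r, c)]))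

def bScan (cols : Nat) : List (List Int) → Int → PySem.Dict Int (List (Int × Int)) → PySem.Dict Int (List (Int × Int))
  | [], _, d => d
  | row :: rest, r, d => bScan cols rest (r + 1) (bScanRow r (row.take cols) 0 d)

-- 'for (nr, nc) in pos.get(v + 1, []): if adjacent: break'
def bFirstAdj (r c : Int) : List (Int × Int) → Option (Int × Int)
  | [] => none
  | (nr, nc) :: rest =>
    if (nr - r).natAbs ≤ 1 ∧ (nc - c).natAbs ≤ 1 then some (nr, nc) else bFirstAdj r c rest

-- the 'while True' walk over index lookups; fuel bounds the iterations (v strictly increases)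
def bLoop (d : PySem.Dict Int (List (Int × Int))) (target : Int) : Nat → Int → Int → Int → Bool
  | 0, _, _, _ => false
  | fuel + 1, r, c, v =>
    match bFirstAdj r c (d.getD (v + 1) []) with
    | none => false
    | some (nr, nc) => if v + 1 = target then true else bLoop d target fuel nr nc (v + 1)

def isKingsTour_alt (board : List (List Int)) : Bool :=
  let cols := (board.headD []).length
  let d := bScan cols board 0 PySem.Dict.empty
  if d.contains 0 || (d.getD 1 []).length != 1 then false
  else
    match d.getD 1 [] with
    | (r, c) :: _ =>
      bLoop d ((board.length : Int) * (board.length : Int)) (board.length * cols + 1) r c 1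
    | [] => false

-- ===== PRECONDITION & SPEC =====
-- Pre_ excludes ragged and empty boards (A can raise IndexError there) and boards
-- containing neither a 0 nor a 1 (find1 returns (None, None) and A raises TypeError).
def Pre_isKingsTour (board : List (List Int)) : Prop :=
  (∀ row ∈ board, row.length = (board.headD []).length) ∧
  ∃ row ∈ board, ((0 : Int) ∈ row ∨ (1 : Int) ∈ row)
instance (board : List (List Int)) : Decidable (Pre_isKingsTour board) := by
  unfold Pre_isKingsTour; infer_instance

def pvWitness_isKingsTour : List (List Int) := [[1, 2], [4, 3]]

def Spec_isKingsTour (board : List (List Int)) (out : Bool) : Prop := out = isKingsTour_alt board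
instance (board : List (List Int)) (out : Bool) : Decidable (Spec_isKingsTour board out) := by
  unfold Spec_isKingsTour; infer_instance

-- ===== CLAIM (what is proved, stated in full; the proofs are below) =====
def Claim_equal_isKingsTour : Prop := ∀ (board : List (List Int)), Dom_isKingsTour board → Pre_isKingsTour board → Spec_isKingsTour board (isKingsTour board)

-- ===== LEMMAS AND PROOFS =====

-- abbreviation for the rectangularity half of Pre_
def Rect (board : List (List Int)) : Prop := ∀ row ∈ board, row.length = (board.headD []).length

-- invariant of A's walk: every checked cell holds a value ≤ the current point
def InvC (board checked : List (List Int)) (point : Int) : Prop :=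
  ∀ i j : Int, 0 ≤ i → i < (board.length : Int) → 0 ≤ j → j < ((board.headD []).length : Int) →
    pvGet2 checked i j ≠ 0 → pvGet2 board i j ≤ point

-- shape of the checked matrix
def Shape (board checked : List (List Int)) : Prop :=
  checked.length = board.length ∧ ∀ row ∈ checked, row.length = (board.headD []).length

theorem pvGetD_toNat {α : Type} (xs : List α) (i : Int) (d : α) (h : 0 ≤ i) :
    PySem.List.pyGetD xs i d = (xs[i.toNat]?).getD d := by
  have h2 : i = ((i.toNat : Nat) : Int) := by omega
  rw [h2, PySem.List.pyGetD_natCast]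
  have h3 : (max i 0).toNat = i.toNat := by omega
  simp [List.getD_eq_getElem?_getD, h3]

theorem pvAtO_noneRow (k : Nat) (j : Int) : pvAtO (makeNoneRow k) j = none := by
  unfold pvAtO makeNoneRow PySem.List.pyGetD
  cases h : PySem.List.pyGet? (List.replicate (k + 2) (none : Option Int)) j with
  | none => simp
  | some x =>
    have := PySem.List.mem_of_pyGet?_eq_some _ h
    simp_all [List.eq_of_mem_replicate this]

theorem pvAtO_sandwich (r : List Int) (j : Int) (h0 : 0 ≤ j) (h1 : j ≤ (r.length : Int) + 1) :
    pvAtO ([none] ++ r.map some ++ [none]) j =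
      if 1 ≤ j ∧ j ≤ (r.length : Int) then some (pvAtI r (j - 1)) else none := by
  unfold pvAtO pvAtI
  rw [pvGetD_toNat _ _ _ h0]
  by_cases hmid : 1 ≤ j ∧ j ≤ (r.length : Int)
  · rw [if_pos hmid]
    rw [List.getElem?_append_left (by simp; omega),
        List.getElem?_append_right (by simp; omega), List.getElem?_map]
    have h3 : j.toNat - List.length [(none : Option Int)] = (j - 1).toNat := by simp
    rw [h3, List.getElem?_eq_getElem (by omega)]
    rw [pvGetD_toNat _ _ _ (by omega), List.getElem?_eq_getElem (by omega)]
    simp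
  · rw [if_neg hmid]
    rcases (by omega : j = 0 ∨ j = (r.length : Int) + 1) with h | h
    · subst h; simp
    · rw [List.getElem?_append_right (by simp; omega)]
      have h4 : j.toNat = r.length + 1 := by omega
      simp [h4]

theorem pvRowO_mfb (board : List (List Int)) (i : Int) (h0 : 0 ≤ i) (h1 : i ≤ (board.length : Int) + 1) :
    pvRowO (makeFullBoard board) i =
      if 1 ≤ i ∧ i ≤ (board.length : Int) then [none] ++ (pvRow board (i - 1)).map some ++ [none]
      else makeNoneRow (board.headD []).length := by
  unfold pvRowO makeFullBoard
  rw [pvGetD_toNat _ _ _ h0]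
  by_cases hmid : 1 ≤ i ∧ i ≤ (board.length : Int)
  · rw [if_pos hmid]
    rw [List.getElem?_append_left (by simp; omega),
        List.getElem?_append_right (by simp; omega), List.getElem?_map]
    have h3 : i.toNat - List.length [makeNoneRow (board.headD []).length] = (i - 1).toNat := by
      simp
    rw [h3, List.getElem?_eq_getElem (by omega)]
    rw [pvRow, pvGetD_toNat _ _ _ (by omega), List.getElem?_eq_getElem (by omega)]
    simp
  · rw [if_neg hmid]
    rcases (by omega : i = 0 ∨ i = (board.length : Int) + 1) with h | h
    · subst h; simp
    · rw [List.getElem?_append_right (by simp; omega)]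
      have h4 : i.toNat = board.length + 1 := by omega
      simp [h4]

theorem pvRow_mem (board : List (List Int)) (i : Int) (h0 : 0 ≤ i) (h1 : i < (board.length : Int)) :
    pvRow board i ∈ board := by
  unfold pvRow
  rw [pvGetD_toNat _ _ _ h0, List.getElem?_eq_getElem (by omega)]
  exact List.getElem_mem _

theorem rect_row_len (board : List (List Int)) (hrect : Rect board) (i : Int)
    (h0 : 0 ≤ i) (h1 : i < (board.length : Int)) :
    (pvRow board i).length = (board.headD []).length :=
  hrect _ (pvRow_mem board i h0 h1)

theorem valueFB (board : List (List Int)) (hrect : Rect board) (i j : Int)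
    (hi0 : 0 ≤ i) (hi1 : i ≤ (board.length : Int) + 1)
    (hj0 : 0 ≤ j) (hj1 : j ≤ ((board.headD []).length : Int) + 1) :
    pvAtO (pvRowO (makeFullBoard board) i) j =
      if 1 ≤ i ∧ i ≤ (board.length : Int) ∧ 1 ≤ j ∧ j ≤ ((board.headD []).length : Int)
      then some (pvGet2 board (i - 1) (j - 1)) else none := by
  rw [pvRowO_mfb board i hi0 hi1]
  by_cases hm : 1 ≤ i ∧ i ≤ (board.length : Int)
  · rw [if_pos hm]
    have hlen : (pvRow board (i - 1)).length = (board.headD []).length :=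
      rect_row_len board hrect (i - 1) (by omega) (by omega)
    rw [pvAtO_sandwich _ j hj0 (by rw [hlen]; omega)]
    unfold pvGet2
    rw [hlen]
    by_cases hj : 1 ≤ j ∧ j ≤ ((board.headD []).length : Int)
    · rw [if_pos hj, if_pos ⟨hm.1, hm.2, hj.1, hj.2⟩]
    · rw [if_neg hj, if_neg (by tauto)]
  · rw [if_neg hm, pvAtO_noneRow, if_neg (by tauto)]

theorem checkA_eq (point : Int) (o : Option Int) :
    checkA point o = true ↔ o = some (point + 1) := by
  cases o with
  | none => simp [checkA]
  | some v => simp [checkA]; omega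

theorem pvAtI_pvSet1 (r : List Int) (b j v : Int) (hj0 : 0 ≤ j) (hj1 : j < (r.length : Int)) :
    pvAtI (pvSet1 r b v) j = if j = b then v else pvAtI r j := by
  unfold pvAtI pvSet1
  rw [pvGetD_toNat _ _ _ hj0, pvGetD_toNat _ _ _ hj0]
  rw [List.getElem?_eq_getElem (by simp [List.length_mapIdx]; omega),
      List.getElem?_eq_getElem (by omega)]
  rw [List.getElem_mapIdx]
  by_cases h : j = b
  · rw [if_pos h, if_pos (show ((j.toNat : Nat) : Int) = b by omega)]; simp
  · rw [if_neg h, if_neg (show ¬ ((j.toNat : Nat) : Int) = b by omega)]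

theorem pvGet2_pvSet2 (m : List (List Int)) (L : Nat) (hL : ∀ row ∈ m, row.length = L)
    (a b i j v : Int) (hi0 : 0 ≤ i) (hi1 : i < (m.length : Int)) (hj0 : 0 ≤ j) (hj1 : j < (L : Int)) :
    pvGet2 (pvSet2 m a b v) i j = if i = a ∧ j = b then v else pvGet2 m i j := by
  unfold pvGet2 pvRow pvSet2
  rw [pvGetD_toNat _ _ _ hi0, pvGetD_toNat _ _ _ hi0]
  rw [List.getElem?_eq_getElem (by simp [List.length_mapIdx]; omega),
      List.getElem?_eq_getElem (by omega)]
  rw [List.getElem_mapIdx]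
  have hrow : m[i.toNat]'(by omega) ∈ m := List.getElem_mem _
  have hlen : (m[i.toNat]'(by omega)).length = L := hL _ hrow
  simp only [Option.getD_some]
  by_cases h : (i.toNat : Int) = a
  · rw [if_pos h]
    rw [pvAtI_pvSet1 _ b j v hj0 (by omega)]
    by_cases hb : j = b
    · rw [if_pos hb, if_pos ⟨by omega, hb⟩]
    · rw [if_neg hb, if_neg (by tauto)]
  · rw [if_neg h, if_neg (by omega)]

theorem shape_pvSet2 (board m : List (List Int)) (a b v : Int) (h : Shape board m) :
    Shape board (pvSet2 m a b v) := by
  obtain ⟨h1, h2⟩ := h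
  refine ⟨by simp [pvSet2, List.length_mapIdx, h1], ?_⟩
  intro row hrow
  rw [pvSet2, List.mem_mapIdx] at hrow
  obtain ⟨k, hk, hkrow⟩ := hrow
  have hmem : m[k]'hk ∈ m := List.getElem_mem _
  by_cases hik : (k : Int) = a
  · rw [if_pos hik] at hkrow
    subst hkrow
    rw [pvSet1, List.length_mapIdx]
    exact h2 _ hmem
  · rw [if_neg hik] at hkrow
    subst hkrow
    exact h2 _ hmem

theorem shape_makeCheckedList (board : List (List Int)) : Shape board (makeCheckedList board) := by
  constructor
  · simp [makeCheckedList]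
  · intro row hrow
    simp [makeCheckedList] at hrow
    simp [hrow]

theorem pvAtI_replicate (k : Nat) (j : Int) : pvAtI (List.replicate k 0) j = 0 := by
  unfold pvAtI PySem.List.pyGetD
  cases h : PySem.List.pyGet? (List.replicate k (0 : Int)) j with
  | none => simp
  | some x =>
    have := PySem.List.mem_of_pyGet?_eq_some _ h
    simp_all [List.eq_of_mem_replicate this]

theorem pvGet2_makeCheckedList (board : List (List Int)) (i j : Int)
    (hi0 : 0 ≤ i) (hi1 : i < (board.length : Int)) :
    pvGet2 (makeCheckedList board) i j = 0 := by
  unfold pvGet2 pvRow makeCheckedList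
  rw [pvGetD_toNat _ _ _ hi0, List.getElem?_eq_getElem (by simp; omega)]
  rw [List.getElem_map]
  simp only [Option.getD_some]
  exact pvAtI_replicate _ _

-- ===== the common step value: the row-major first in-bounds cell holding v+1 in the 3x3 window =====

def cand (board : List (List Int)) (v i j : Int) : Option (Int × Int) :=
  if 0 ≤ i ∧ i < (board.length : Int) ∧ 0 ≤ j ∧ j < ((board.headD []).length : Int) ∧
      pvGet2 board i j = v + 1
  then some (i, j) else none

def chain (board : List (List Int)) (v r c : Int) : Option (Int × Int) :=
  (cand board v (r-1) (c-1)).or ((cand board v (r-1) c).or ((cand board v (r-1) (c+1)).or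
  ((cand board v r (c-1)).or ((cand board v r (c+1)).or
  ((cand board v (r+1) (c-1)).or ((cand board v (r+1) c).or (cand board v (r+1) (c+1))))))))

theorem cand_some (board : List (List Int)) (v i j : Int) (q : Int × Int)
    (h : cand board v i j = some q) :
    0 ≤ q.1 ∧ q.1 < (board.length : Int) ∧ 0 ≤ q.2 ∧ q.2 < ((board.headD []).length : Int) ∧
      pvGet2 board q.1 q.2 = v + 1 := by
  unfold cand at h
  split_ifs at h with hc
  · cases h; exact hc

theorem or_eq_some {α : Type} (x y : Option α) (q : α) (h : x.or y = some q) :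
    x = some q ∨ y = some q := by
  cases x with
  | none => exact Or.inr h
  | some a => exact Or.inl h

theorem chain_some (board : List (List Int)) (v r c : Int) (q : Int × Int)
    (h : chain board v r c = some q) :
    0 ≤ q.1 ∧ q.1 < (board.length : Int) ∧ 0 ≤ q.2 ∧ q.2 < ((board.headD []).length : Int) ∧
      pvGet2 board q.1 q.2 = v + 1 := by
  unfold chain at h
  rcases or_eq_some _ _ _ h with h | h
  · exact cand_some _ _ _ _ _ h
  rcases or_eq_some _ _ _ h with h | h
  · exact cand_some _ _ _ _ _ h
  rcases or_eq_some _ _ _ h with h | h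
  · exact cand_some _ _ _ _ _ h
  rcases or_eq_some _ _ _ h with h | h
  · exact cand_some _ _ _ _ _ h
  rcases or_eq_some _ _ _ h with h | h
  · exact cand_some _ _ _ _ _ h
  rcases or_eq_some _ _ _ h with h | h
  · exact cand_some _ _ _ _ _ h
  rcases or_eq_some _ _ _ h with h | h
  · exact cand_some _ _ _ _ _ h
  · exact cand_some _ _ _ _ _ h

-- ===== A's step equals the chain =====

-- one candidate of findNextmove's scan equals cand's condition
theorem cand_iff (board checked : List (List Int)) (point pRow pCol : Int)
    (hrect : Rect board) (hinv : InvC board checked point)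
    (hr0 : 0 ≤ pRow) (hr1 : pRow < (board.length : Int))
    (hc0 : 0 ≤ pCol) (hc1 : pCol < ((board.headD []).length : Int))
    (I R c C : Int) (hI : I = R + 1) (hC : C = c - 1)
    (hRb : pRow - 1 ≤ R ∧ R ≤ pRow + 1) (hCb : pCol - 1 ≤ C ∧ C ≤ pCol + 1) :
    ((checkA point (pvAtO (pvRowO (makeFullBoard board) I) c) = true ∧ pvGet2 checked R C = 0)
      ↔ (0 ≤ R ∧ R < (board.length : Int) ∧ 0 ≤ C ∧ C < ((board.headD []).length : Int) ∧
          pvGet2 board R C = point + 1)) := by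
  subst hI hC
  rw [checkA_eq]
  rw [valueFB board hrect (R + 1) c (by omega) (by omega) (by omega) (by omega)]
  have e1 : R + 1 - 1 = R := by ring
  rw [e1]
  constructor
  · rintro ⟨hv, _⟩
    split_ifs at hv with hcond
    · simp only [Option.some.injEq] at hv
      exact ⟨by omega, by omega, by omega, by omega, hv⟩
  · rintro ⟨h1, h2, h3, h4, h5⟩
    rw [if_pos (show 1 ≤ R + 1 ∧ R + 1 ≤ (board.length : Int) ∧
        1 ≤ c ∧ c ≤ ((board.headD []).length : Int) by omega)]
    refine ⟨by rw [h5], ?_⟩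
    by_contra hne
    have := hinv R (c - 1) h1 h2 h3 h4 hne
    omega

-- one row of A's scan as an or-chain of cand (side rows: three probes)
theorem rowA_side (board checked : List (List Int)) (point pRow pCol dr I : Int)
    (hrect : Rect board) (hinv : InvC board checked point)
    (hr0 : 0 ≤ pRow) (hr1 : pRow < (board.length : Int))
    (hc0 : 0 ≤ pCol) (hc1 : pCol < ((board.headD []).length : Int))
    (hdr : dr = -1 ∨ dr = 1) (hI : I = pRow + dr + 1) :
    scanColsA point (pvRowO (makeFullBoard board) I) (pRow + dr) checked
        [pCol + 0, pCol + 1, pCol + 2] =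
      (cand board point (pRow + dr) (pCol - 1)).or
        ((cand board point (pRow + dr) pCol).or (cand board point (pRow + dr) (pCol + 1))) := by
  have c1 := cand_iff board checked point pRow pCol hrect hinv hr0 hr1 hc0 hc1
      I (pRow + dr) (pCol + 0) (pCol + 0 - 1) (by omega) (by ring) (by omega) (by omega)
  have c2 := cand_iff board checked point pRow pCol hrect hinv hr0 hr1 hc0 hc1
      I (pRow + dr) (pCol + 1) (pCol + 1 - 1) (by omega) (by ring) (by omega) (by omega)
  have c3 := cand_iff board checked point pRow pCol hrect hinv hr0 hr1 hc0 hc1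
      I (pRow + dr) (pCol + 2) (pCol + 2 - 1) (by omega) (by ring) (by omega) (by omega)
  rw [scanColsA, scanColsA, scanColsA, scanColsA]
  simp only [c1, c2, c3]
  rw [show pCol + 0 - 1 = pCol - 1 from by ring, show pCol + 1 - 1 = pCol from by ring,
      show pCol + 2 - 1 = pCol + 1 from by ring]
  unfold cand
  split_ifs <;> rfl

-- the middle row of A's scan (two probes)
theorem rowA_mid (board checked : List (List Int)) (point pRow pCol I : Int)
    (hrect : Rect board) (hinv : InvC board checked point)
    (hr0 : 0 ≤ pRow) (hr1 : pRow < (board.length : Int))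
    (hc0 : 0 ≤ pCol) (hc1 : pCol < ((board.headD []).length : Int))
    (hI : I = pRow + 1) :
    scanColsA point (pvRowO (makeFullBoard board) I) pRow checked [pCol + 0, pCol + 2] =
      (cand board point pRow (pCol - 1)).or (cand board point pRow (pCol + 1)) := by
  have c1 := cand_iff board checked point pRow pCol hrect hinv hr0 hr1 hc0 hc1
      I pRow (pCol + 0) (pCol + 0 - 1) (by omega) (by ring) (by omega) (by omega)
  have c3 := cand_iff board checked point pRow pCol hrect hinv hr0 hr1 hc0 hc1
      I pRow (pCol + 2) (pCol + 2 - 1) (by omega) (by ring) (by omega) (by omega)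
  rw [scanColsA, scanColsA, scanColsA]
  simp only [c1, c3]
  rw [show pCol + 0 - 1 = pCol - 1 from by ring, show pCol + 2 - 1 = pCol + 1 from by ring]
  unfold cand
  split_ifs <;> rfl

theorem matchOr (x y : Option (Int × Int)) :
    (match x with | some p => some p | none => y) = x.or y := by
  cases x <;> rfl

theorem findSome?_cons_or {α β : Type} (f : α → Option β) (a : α) (l : List α) :
    List.findSome? f (a :: l) = (f a).or (List.findSome? f l) := by
  rw [List.findSome?_cons]; cases f a <;> rfl

theorem stepA_chain (board checked : List (List Int)) (point pRow pCol : Int)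
    (hrect : Rect board) (hinv : InvC board checked point)
    (hr0 : 0 ≤ pRow) (hr1 : pRow < (board.length : Int))
    (hc0 : 0 ≤ pCol) (hc1 : pCol < ((board.headD []).length : Int)) :
    findNextmove point pRow pCol (makeFullBoard board) checked = chain board point pRow pCol := by
  rw [findNextmove]
  rw [show pRow + 1 - 1 - 1 = pRow + -1 from by ring,
      show pRow + 1 + 1 - 1 = pRow + 1 from by ring,
      show pRow + 1 - 1 = pRow from by ring,
      show pCol + 1 - 1 = pCol + 0 from by ring,
      show pCol + 1 + 1 = pCol + 2 from by ring]
  rw [rowA_side board checked point pRow pCol (-1) pRow hrect hinv hr0 hr1 hc0 hc1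
        (Or.inl rfl) (by ring),
      rowA_mid board checked point pRow pCol (pRow + 1) hrect hinv hr0 hr1 hc0 hc1 rfl,
      rowA_side board checked point pRow pCol 1 (pRow + 1 + 1) hrect hinv hr0 hr1 hc0 hc1
        (Or.inr rfl) rfl]
  rw [matchOr, matchOr]
  rw [show pRow + -1 = pRow - 1 from by ring]
  unfold chain
  simp only [Option.or_assoc]

-- ===== the pair list behind B's scan =====

def bPairsRow (r : Int) : List Int → Int → List (Int × (Int × Int))
  | [], _ => []
  | v :: rest, c => (v, (r, c)) :: bPairsRow r rest (c + 1)

def bPairs (cols : Nat) : List (List Int) → Int → List (Int × (Int × Int))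
  | [], _ => []
  | row :: rest, r => bPairsRow r (row.take cols) 0 ++ bPairs cols rest (r + 1)

def posOf (board : List (List Int)) (w : Int) : List (Int × Int) :=
  (((bPairs (board.headD []).length board 0).filter (fun p => p.1 == w)).map (·.2))

theorem bScanRow_foldl (r : Int) : ∀ (vals : List Int) (c : Int) (d : PySem.Dict Int (List (Int × Int))),
    bScanRow r vals c d =
      (bPairsRow r vals c).foldl (fun d p => d.modify p.1 [] (fun l => l ++ [p.2])) d := by
  intro vals
  induction vals with
  | nil => intro c d; rfl
  | cons v rest ih => intro c d; rw [bScanRow, bPairsRow, List.foldl_cons, ih]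

theorem bScan_foldl (cols : Nat) : ∀ (l : List (List Int)) (r : Int) (d : PySem.Dict Int (List (Int × Int))),
    bScan cols l r d =
      (bPairs cols l r).foldl (fun d p => d.modify p.1 [] (fun l => l ++ [p.2])) d := by
  intro l
  induction l with
  | nil => intro r d; rfl
  | cons row rest ih =>
    intro r d
    rw [bScan, bPairs, List.foldl_append, ih, bScanRow_foldl]

theorem getD_bScan (board : List (List Int)) (w : Int) :
    (bScan (board.headD []).length board 0 PySem.Dict.empty).getD w [] = posOf board w := by
  rw [bScan_foldl, PySem.Dict.getD_foldl_modify_append, PySem.Dict.getD_empty]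
  rfl

theorem contains_foldl (k : Int) : ∀ (l : List (Int × (Int × Int))) (d : PySem.Dict Int (List (Int × Int))),
    (l.foldl (fun d p => d.modify p.1 [] (fun l => l ++ [p.2])) d).contains k =
      (d.contains k || l.any (fun p => p.1 == k)) := by
  intro l
  induction l with
  | nil => intro d; rw [List.foldl_nil, List.any_nil, Bool.or_false]
  | cons p rest ih =>
    intro d
    rw [List.foldl_cons, ih, List.any_cons, PySem.Dict.contains_modify]
    have hcomm : (k == p.1) = (p.1 == k) := by
      by_cases h : k = p.1
      · rw [h]
      · rw [beq_eq_false_iff_ne.mpr h, beq_eq_false_iff_ne.mpr (Ne.symm h)]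
    rw [hcomm, ← Bool.or_assoc, Bool.or_comm (p.1 == k) (PySem.Dict.contains d k), Bool.or_assoc]

theorem contains_bScan (board : List (List Int)) (k : Int) :
    (bScan (board.headD []).length board 0 PySem.Dict.empty).contains k =
      (bPairs (board.headD []).length board 0).any (fun p => p.1 == k) := by
  rw [bScan_foldl, contains_foldl, PySem.Dict.contains_empty, Bool.false_or]

-- every pair produced by the scan is an in-bounds cell with its value
theorem bPairsRow_mem (board : List (List Int)) (i : Int) :
    ∀ (vals : List Int) (j0 : Int) (p : Int × (Int × Int)),
      0 ≤ j0 →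
      (∀ k : Nat, (hk : k < vals.length) → vals[k] = pvAtI (pvRow board i) (j0 + k)) →
      j0 + (vals.length : Int) ≤ ((board.headD []).length : Int) →
      p ∈ bPairsRow i vals j0 →
      p.2.1 = i ∧ 0 ≤ p.2.2 ∧ p.2.2 < ((board.headD []).length : Int) ∧
        pvGet2 board i p.2.2 = p.1 := by
  intro vals
  induction vals with
  | nil => intro j0 p _ _ _ hp; simp [bPairsRow] at hp
  | cons v rest ih =>
    intro j0 p hj0 hvals hlen hp
    rw [bPairsRow] at hp
    rcases List.mem_cons.mp hp with h | h
    · subst h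
      have h0 := hvals 0 (by simp)
      simp only [List.getElem_cons_zero, Int.natCast_zero, add_zero] at h0
      dsimp only
      refine ⟨rfl, hj0, ?_, ?_⟩
      · simp only [List.length_cons] at hlen; push_cast at hlen; omega
      · unfold pvGet2; exact h0.symm
    · apply ih (j0 + 1) p (by omega) _ _ h
      · intro k hk
        have h5 := hvals (k + 1) (by simp; omega)
        simp only [List.getElem_cons_succ] at h5
        have e : j0 + ((k + 1 : Nat) : Int) = j0 + 1 + (k : Int) := by push_cast; ring
        rw [← e]
        exact h5
      · simp only [List.length_cons] at hlen; push_cast at hlen ⊢; omega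

theorem bPairs_mem (board : List (List Int)) (hrect : Rect board) :
    ∀ (l : List (List Int)) (r0 : Int) (p : Int × (Int × Int)),
      0 ≤ r0 → r0 + (l.length : Int) ≤ (board.length : Int) →
      (∀ k : Nat, (hk : k < l.length) → l[k] = pvRow board (r0 + k)) →
      p ∈ bPairs (board.headD []).length l r0 →
      0 ≤ p.2.1 ∧ p.2.1 < (board.length : Int) ∧ 0 ≤ p.2.2 ∧
        p.2.2 < ((board.headD []).length : Int) ∧ pvGet2 board p.2.1 p.2.2 = p.1 := by
  intro l
  induction l with
  | nil => intro r0 p _ _ _ hp; simp [bPairs] at hp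
  | cons row rest ih =>
    intro r0 p hr0 hlen hrows hp
    have hrow0 : row = pvRow board (r0 + 0) := by simpa using hrows 0 (by simp)
    have hr1 : r0 < (board.length : Int) := by
      simp only [List.length_cons] at hlen; push_cast at hlen; omega
    have hrlen : row.length = (board.headD []).length := by
      rw [hrow0]; exact rect_row_len board hrect (r0 + 0) (by omega) (by omega)
    have htake : row.take (board.headD []).length = row := List.take_of_length_le (by omega)
    rw [bPairs] at hp
    rcases List.mem_append.mp hp with h | h
    · rw [htake] at h
      have := bPairsRow_mem board r0 row 0 p (by omega) ?_ (by omega) h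
      · exact ⟨this.1 ▸ hr0, this.1 ▸ hr1, this.2.1, this.2.2.1, this.1 ▸ this.2.2.2⟩
      · intro k hk
        have hrow0' : row = pvRow board r0 := by rw [hrow0, add_zero]
        rw [← hrow0', pvAtI, pvGetD_toNat _ _ _ (by omega), zero_add,
            show ((k : Int)).toNat = k from by omega, List.getElem?_eq_getElem hk]
        rfl
    · apply ih (r0 + 1) p (by omega)
        (by simp only [List.length_cons] at hlen; push_cast at hlen ⊢; omega) _ h
      intro k hk
      have h5 := hrows (k + 1) (by simp; omega)
      simp only [List.getElem_cons_succ] at h5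
      have e : r0 + ((k + 1 : Nat) : Int) = r0 + 1 + (k : Int) := by push_cast; ring
      rw [← e]
      exact h5

theorem posOf_mem (board : List (List Int)) (hrect : Rect board) (w : Int) (q : Int × Int)
    (hq : q ∈ posOf board w) :
    0 ≤ q.1 ∧ q.1 < (board.length : Int) ∧ 0 ≤ q.2 ∧ q.2 < ((board.headD []).length : Int) ∧
      pvGet2 board q.1 q.2 = w := by
  unfold posOf at hq
  rcases List.mem_map.mp hq with ⟨p, hpmem, hpq⟩
  rcases List.mem_filter.mp hpmem with ⟨hmem, hkey⟩
  have hw : p.1 = w := by simpa using hkey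
  have := bPairs_mem board hrect board 0 p (le_refl 0) (by simp) ?_ hmem
  · subst hpq; exact ⟨this.1, this.2.1, this.2.2.1, this.2.2.2.1, hw ▸ this.2.2.2.2⟩
  · intro k hk
    rw [pvRow, pvGetD_toNat _ _ _ (by omega)]
    have e : ((0 : Int) + (k : Int)).toNat = k := by omega
    rw [zero_add, show ((k : Int)).toNat = k from by omega, List.getElem?_eq_getElem hk]
    rfl

-- ===== B's step equals the chain =====

def gsel (v r c : Int) (p : Int × (Int × Int)) : Option (Int × Int) :=
  if p.1 = v + 1 ∧ (p.2.1 - r).natAbs ≤ 1 ∧ (p.2.2 - c).natAbs ≤ 1 then some p.2 else none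

theorem firstAdj_findSome? (v r c : Int) :
    ∀ (l : List (Int × (Int × Int))),
      bFirstAdj r c ((l.filter (fun p => p.1 == v + 1)).map (·.2)) = l.findSome? (gsel v r c) := by
  intro l
  induction l with
  | nil => rfl
  | cons p rest ih =>
    obtain ⟨pv, pa, pb⟩ := p
    rw [findSome?_cons_or, List.filter_cons]
    by_cases hv : pv = v + 1
    · rw [if_pos (show ((fun p => p.1 == v + 1) ((pv, (pa, pb)) : Int × (Int × Int)) = true) by simpa using hv),
          List.map_cons, bFirstAdj]
      by_cases hadj : (pa - r).natAbs ≤ 1 ∧ (pb - c).natAbs ≤ 1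
      · rw [if_pos hadj]
        have : gsel v r c (pv, (pa, pb)) = some (pa, pb) := by
          unfold gsel; rw [if_pos ⟨hv, hadj.1, hadj.2⟩]
        rw [this]
        rfl
      · rw [if_neg hadj]
        have : gsel v r c (pv, (pa, pb)) = none := by
          unfold gsel
          rw [if_neg (by rintro ⟨_, h1, h2⟩; exact hadj ⟨h1, h2⟩)]
        rw [this, ih, Option.none_or]
    · rw [if_neg (show ¬ ((fun p => p.1 == v + 1) ((pv, (pa, pb)) : Int × (Int × Int)) = true) by simpa using hv)]
      have hg : gsel v r c (pv, (pa, pb)) = none := by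
        unfold gsel; rw [if_neg (by rintro ⟨h1, _⟩; exact hv h1)]
      rw [hg, ih, Option.none_or]

-- a row more than one away contributes nothing
theorem rowNone (v r c i : Int) (hfar : ¬ (i - r).natAbs ≤ 1) :
    ∀ (vals : List Int) (j0 : Int), (bPairsRow i vals j0).findSome? (gsel v r c) = none := by
  intro vals
  induction vals with
  | nil => intro j0; rfl
  | cons w rest ih =>
    intro j0
    rw [bPairsRow, findSome?_cons_or]
    have hg : gsel v r c (w, (i, j0)) = none := by
      unfold gsel
      rw [if_neg (by rintro ⟨_, h1, _⟩; exact hfar h1)]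
    rw [hg, ih, Option.none_or]

-- column candidate within a present row
def colC (board : List (List Int)) (v i j : Int) : Option (Int × Int) :=
  if 0 ≤ j ∧ j < ((board.headD []).length : Int) ∧ pvGet2 board i j = v + 1
  then some (i, j) else none

-- window decomposition of one row of the index scan
theorem rowWindow (board : List (List Int)) (v r c i : Int)
    (hadj : (i - r).natAbs ≤ 1) (hc1 : c < ((board.headD []).length : Int)) :
    ∀ (vals : List Int) (j0 : Int),
      0 ≤ j0 →
      (∀ k : Nat, (hk : k < vals.length) → vals[k] = pvAtI (pvRow board i) (j0 + k)) →
      j0 + (vals.length : Int) = ((board.headD []).length : Int) →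
      (bPairsRow i vals j0).findSome? (gsel v r c) =
        (if j0 ≤ c - 1 then colC board v i (c - 1) else none).or
          ((if j0 ≤ c then colC board v i c else none).or
            (if j0 ≤ c + 1 then colC board v i (c + 1) else none)) := by
  intro vals
  induction vals with
  | nil =>
    intro j0 hj0 hvals hlen
    simp only [List.length_nil, Int.natCast_zero, add_zero] at hlen
    rw [bPairsRow]
    have g1 : ¬ j0 ≤ c - 1 := by omega
    have g2 : ¬ j0 ≤ c := by omega
    rw [if_neg g1, if_neg g2]
    by_cases g3 : j0 ≤ c + 1
    · rw [if_pos g3]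
      have : colC board v i (c + 1) = none := by
        unfold colC; rw [if_neg (by rintro ⟨_, h, _⟩; omega)]
      rw [this]; rfl
    · rw [if_neg g3]; rfl
  | cons w rest ih =>
    intro j0 hj0 hvals hlen
    have hw : w = pvGet2 board i j0 := by
      have h0 := hvals 0 (by simp)
      simp only [List.getElem_cons_zero, Int.natCast_zero, add_zero] at h0
      rw [h0]; rfl
    have hrest : ∀ k : Nat, (hk : k < rest.length) → rest[k] = pvAtI (pvRow board i) (j0 + 1 + k) := by
      intro k hk
      have h5 := hvals (k + 1) (by simp; omega)
      simp only [List.getElem_cons_succ] at h5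
      have e : j0 + ((k + 1 : Nat) : Int) = j0 + 1 + (k : Int) := by push_cast; ring
      rw [← e]; exact h5
    have hlen' : j0 + 1 + (rest.length : Int) = ((board.headD []).length : Int) := by
      simp only [List.length_cons] at hlen; push_cast at hlen ⊢; omega
    rw [bPairsRow, findSome?_cons_or]
    have ihr := ih (j0 + 1) (by omega) hrest hlen'
    by_cases hin : (j0 - c).natAbs ≤ 1
    · -- j0 ∈ {c-1, c, c+1}: the head probe IS the corresponding colC
      have hhead : gsel v r c (w, (i, j0)) = colC board v i j0 := by
        unfold gsel colC
        by_cases hval : pvGet2 board i j0 = v + 1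
        · rw [if_pos ⟨by rw [hw, hval], hadj, hin⟩, if_pos ⟨hj0, by omega, hval⟩]
        · rw [if_neg (by rintro ⟨h1, _⟩; exact hval (hw.symm.trans h1)),
              if_neg (by rintro ⟨_, _, h3⟩; exact hval h3)]
      rcases (by omega : j0 = c - 1 ∨ j0 = c ∨ j0 = c + 1) with h | h | h
      · subst h
        rw [hhead, ihr, show c - 1 + 1 = c from by ring]
        rw [if_neg (by omega : ¬ c ≤ c - 1), if_pos (le_refl c), if_pos (by omega : c ≤ c + 1),
            if_pos (le_refl (c - 1)), if_pos (by omega : c - 1 ≤ c),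
            if_pos (by omega : c - 1 ≤ c + 1)]
        simp only [Option.none_or]
      · subst h
        rw [hhead, ihr]
        rw [if_neg (by omega : ¬ j0 + 1 ≤ j0 - 1), if_neg (by omega : ¬ j0 + 1 ≤ j0),
            if_pos (le_refl (j0 + 1)), if_neg (by omega : ¬ j0 ≤ j0 - 1), if_pos (le_refl j0),
            if_pos (by omega : j0 ≤ j0 + 1)]
        simp only [Option.none_or]
      · subst h
        rw [hhead, ihr]
        rw [if_neg (by omega : ¬ c + 1 + 1 ≤ c - 1), if_neg (by omega : ¬ c + 1 + 1 ≤ c),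
            if_neg (by omega : ¬ c + 1 + 1 ≤ c + 1), if_neg (by omega : ¬ c + 1 ≤ c - 1),
            if_neg (by omega : ¬ c + 1 ≤ c), if_pos (le_refl (c + 1))]
        simp only [Option.none_or, Option.or_none]
    · -- head probe misses the window
      have hhead : gsel v r c (w, (i, j0)) = none := by
        unfold gsel; rw [if_neg (by rintro ⟨_, _, h3⟩; exact hin h3)]
      rw [hhead, ihr, Option.none_or]
      rcases (by omega : j0 < c - 1 ∨ j0 > c + 1) with h | h
      · rw [if_pos (by omega : j0 ≤ c - 1), if_pos (by omega : j0 + 1 ≤ c - 1),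
            if_pos (by omega : j0 ≤ c), if_pos (by omega : j0 + 1 ≤ c),
            if_pos (by omega : j0 ≤ c + 1), if_pos (by omega : j0 + 1 ≤ c + 1)]
      · rw [if_neg (by omega : ¬ j0 ≤ c - 1), if_neg (by omega : ¬ j0 + 1 ≤ c - 1),
            if_neg (by omega : ¬ j0 ≤ c), if_neg (by omega : ¬ j0 + 1 ≤ c),
            if_neg (by omega : ¬ j0 ≤ c + 1), if_neg (by omega : ¬ j0 + 1 ≤ c + 1)]

-- per-present-row scan value, packaged
def rowF (board : List (List Int)) (v r c i : Int) : Option (Int × Int) :=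
  if 0 ≤ i ∧ i < (board.length : Int)
  then (bPairsRow i ((pvRow board i).take (board.headD []).length) 0).findSome? (gsel v r c)
  else none

-- window decomposition over the rows
theorem rowsWindow (board : List (List Int)) (v r c : Int)
    (hr0 : 0 ≤ r) (hr1 : r < (board.length : Int)) :
    ∀ (l : List (List Int)) (r0 : Int),
      0 ≤ r0 → r0 + (l.length : Int) = (board.length : Int) →
      (∀ k : Nat, (hk : k < l.length) → l[k] = pvRow board (r0 + k)) →
      (bPairs (board.headD []).length l r0).findSome? (gsel v r c) =
        (if r0 ≤ r - 1 then rowF board v r c (r - 1) else none).or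
          ((if r0 ≤ r then rowF board v r c r else none).or
            (if r0 ≤ r + 1 then rowF board v r c (r + 1) else none)) := by
  intro l
  induction l with
  | nil =>
    intro r0 hr00 hlen hrows
    simp only [List.length_nil, Int.natCast_zero, add_zero] at hlen
    rw [bPairs]
    rw [if_neg (by omega : ¬ r0 ≤ r - 1), if_neg (by omega : ¬ r0 ≤ r)]
    by_cases g3 : r0 ≤ r + 1
    · rw [if_pos g3]
      have : rowF board v r c (r + 1) = none := by
        unfold rowF; rw [if_neg (by rintro ⟨_, h⟩; omega)]
      rw [this]; rfl
    · rw [if_neg g3]; rfl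
  | cons row rest ih =>
    intro r0 hr00 hlen hrows
    have hrow0 : row = pvRow board (r0 + 0) := by simpa using hrows 0 (by simp)
    have hlen' : r0 + 1 + (rest.length : Int) = (board.length : Int) := by
      simp only [List.length_cons] at hlen; push_cast at hlen ⊢; omega
    have hrest : ∀ k : Nat, (hk : k < rest.length) → rest[k] = pvRow board (r0 + 1 + k) := by
      intro k hk
      have h5 := hrows (k + 1) (by simp; omega)
      simp only [List.getElem_cons_succ] at h5
      have e : r0 + ((k + 1 : Nat) : Int) = r0 + 1 + (k : Int) := by push_cast; ring
      rw [← e]; exact h5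
    rw [bPairs, List.findSome?_append]
    have ihr := ih (r0 + 1) (by omega) hlen' hrest
    by_cases hin : (r0 - r).natAbs ≤ 1
    · have hr0b : r0 < (board.length : Int) := by
        simp only [List.length_cons] at hlen; push_cast at hlen; omega
      have hhead : (bPairsRow r0 (row.take (board.headD []).length) 0).findSome? (gsel v r c) =
          rowF board v r c r0 := by
        unfold rowF
        rw [if_pos ⟨hr00, hr0b⟩, hrow0, add_zero]
      rcases (by omega : r0 = r - 1 ∨ r0 = r ∨ r0 = r + 1) with h | h | h
      · subst h
        rw [hhead, ihr, show r - 1 + 1 = r from by ring]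
        rw [if_neg (by omega : ¬ r ≤ r - 1), if_pos (le_refl r), if_pos (by omega : r ≤ r + 1),
            if_pos (le_refl (r - 1)), if_pos (by omega : r - 1 ≤ r),
            if_pos (by omega : r - 1 ≤ r + 1)]
        simp only [Option.none_or]
      · subst h
        rw [hhead, ihr]
        rw [if_neg (by omega : ¬ r0 + 1 ≤ r0 - 1), if_neg (by omega : ¬ r0 + 1 ≤ r0),
            if_pos (le_refl (r0 + 1)), if_neg (by omega : ¬ r0 ≤ r0 - 1), if_pos (le_refl r0),
            if_pos (by omega : r0 ≤ r0 + 1)]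
        simp only [Option.none_or]
      · subst h
        rw [hhead, ihr]
        rw [if_neg (by omega : ¬ r + 1 + 1 ≤ r - 1), if_neg (by omega : ¬ r + 1 + 1 ≤ r),
            if_neg (by omega : ¬ r + 1 + 1 ≤ r + 1), if_neg (by omega : ¬ r + 1 ≤ r - 1),
            if_neg (by omega : ¬ r + 1 ≤ r), if_pos (le_refl (r + 1))]
        simp only [Option.none_or, Option.or_none]
    · rw [rowNone v r c r0 hin, ihr, Option.none_or]
      rcases (by omega : r0 < r - 1 ∨ r0 > r + 1) with h | h
      · rw [if_pos (by omega : r0 ≤ r - 1), if_pos (by omega : r0 + 1 ≤ r - 1),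
            if_pos (by omega : r0 ≤ r), if_pos (by omega : r0 + 1 ≤ r),
            if_pos (by omega : r0 ≤ r + 1), if_pos (by omega : r0 + 1 ≤ r + 1)]
      · rw [if_neg (by omega : ¬ r0 ≤ r - 1), if_neg (by omega : ¬ r0 + 1 ≤ r - 1),
            if_neg (by omega : ¬ r0 ≤ r), if_neg (by omega : ¬ r0 + 1 ≤ r),
            if_neg (by omega : ¬ r0 ≤ r + 1), if_neg (by omega : ¬ r0 + 1 ≤ r + 1)]

-- a present window row's scan as cand or-chain
theorem rowF_chain (board : List (List Int)) (hrect : Rect board) (v r c i : Int)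
    (hadj : (i - r).natAbs ≤ 1) (hc0 : 0 ≤ c) (hc1 : c < ((board.headD []).length : Int))
    (hi : 0 ≤ i ∧ i < (board.length : Int)) :
    rowF board v r c i =
      (cand board v i (c - 1)).or ((cand board v i c).or (cand board v i (c + 1))) := by
  unfold rowF
  rw [if_pos hi]
  have hrlen : (pvRow board i).length = (board.headD []).length :=
    rect_row_len board hrect i hi.1 hi.2
  have htake : (pvRow board i).take (board.headD []).length = pvRow board i :=
    List.take_of_length_le (by omega)
  rw [htake]
  rw [rowWindow board v r c i hadj hc1 (pvRow board i) 0 (le_refl 0) ?_ (by rw [hrlen]; ring)]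
  · have hcc : ∀ j, 0 ≤ j → colC board v i j = cand board v i j := by
      intro j hj
      unfold colC cand
      by_cases hcond : 0 ≤ j ∧ j < ((board.headD []).length : Int) ∧ pvGet2 board i j = v + 1
      · rw [if_pos hcond, if_pos ⟨hi.1, hi.2, hcond.1, hcond.2.1, hcond.2.2⟩]
      · rw [if_neg hcond, if_neg (by rintro ⟨_, _, h3, h4, h5⟩; exact hcond ⟨h3, h4, h5⟩)]
    by_cases hcm : 0 ≤ c - 1
    · rw [if_pos (by omega : (0:Int) ≤ c - 1), if_pos hc0, if_pos (by omega : (0:Int) ≤ c + 1),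
          hcc (c-1) hcm, hcc c hc0, hcc (c+1) (by omega)]
    · rw [if_neg (by omega : ¬ (0:Int) ≤ c - 1), if_pos hc0, if_pos (by omega : (0:Int) ≤ c + 1),
          hcc c hc0, hcc (c+1) (by omega)]
      have : cand board v i (c - 1) = none := by
        unfold cand; rw [if_neg (by rintro ⟨_, _, h3, _⟩; omega)]
      rw [this]
  · intro k hk
    rw [pvAtI, pvGetD_toNat _ _ _ (by omega), zero_add,
        show ((k : Int)).toNat = k from by omega, List.getElem?_eq_getElem hk]
    rfl

-- B's step: first adjacent holder of v+1 in the index = the chain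
theorem stepB_chain (board : List (List Int)) (hrect : Rect board) (v r c : Int)
    (hr0 : 0 ≤ r) (hr1 : r < (board.length : Int))
    (hc0 : 0 ≤ c) (hc1 : c < ((board.headD []).length : Int))
    (hval : pvGet2 board r c = v) :
    bFirstAdj r c (posOf board (v + 1)) = chain board v r c := by
  unfold posOf
  rw [firstAdj_findSome?]
  rw [rowsWindow board v r c hr0 hr1 board 0 (le_refl 0) (by simp) ?_]
  · have hmidF : rowF board v r c r =
        (cand board v r (c - 1)).or ((cand board v r c).or (cand board v r (c + 1))) :=
      rowF_chain board hrect v r c r (by omega) hc0 hc1 ⟨hr0, hr1⟩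
    have hcenter : cand board v r c = none := by
      unfold cand
      rw [if_neg (by rintro ⟨_, _, _, _, h5⟩; omega)]
    have hup : (if (0:Int) ≤ r - 1 then rowF board v r c (r - 1) else none) =
        (cand board v (r-1) (c-1)).or ((cand board v (r-1) c).or (cand board v (r-1) (c+1))) := by
      by_cases h : (0:Int) ≤ r - 1
      · rw [if_pos h, rowF_chain board hrect v r c (r-1) (by omega) hc0 hc1 ⟨h, by omega⟩]
      · rw [if_neg h]
        have hn : ∀ j, cand board v (r-1) j = none := by
          intro j; unfold cand; rw [if_neg (by rintro ⟨h1, _⟩; omega)]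
        rw [hn, hn, hn]; rfl
    have hdn : (if (0:Int) ≤ r + 1 then rowF board v r c (r + 1) else none) =
        (cand board v (r+1) (c-1)).or ((cand board v (r+1) c).or (cand board v (r+1) (c+1))) := by
      rw [if_pos (by omega : (0:Int) ≤ r + 1)]
      by_cases h : r + 1 < (board.length : Int)
      · rw [rowF_chain board hrect v r c (r+1) (by omega) hc0 hc1 ⟨by omega, h⟩]
      · unfold rowF
        rw [if_neg (by rintro ⟨_, h2⟩; omega)]
        have hn : ∀ j, cand board v (r+1) j = none := by
          intro j; unfold cand; rw [if_neg (by rintro ⟨_, h2, _⟩; omega)]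
        rw [hn, hn, hn]; rfl
    rw [hup, if_pos hr0, hmidF, hdn, hcenter]
    unfold chain
    cases cand board v (r-1) (c-1) <;> cases cand board v (r-1) c <;>
      cases cand board v (r-1) (c+1) <;> cases cand board v r (c-1) <;>
      simp [Option.or]
  · intro k hk
    rw [pvRow, pvGetD_toNat _ _ _ (by omega), zero_add,
        show ((k : Int)).toNat = k from by omega, List.getElem?_eq_getElem hk]
    rfl

-- ===== the walk: A's loop = B's loop =====

theorem loop_eq (board : List (List Int)) (hrect : Rect board) :
    ∀ (fuel : Nat) (v r c : Int) (checked : List (List Int)),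
      0 ≤ r → r < (board.length : Int) → 0 ≤ c → c < ((board.headD []).length : Int) →
      pvGet2 board r c = v → Shape board checked → InvC board checked v →
      tourLoopA board (makeFullBoard board) (board.length : Int) fuel v r c checked =
        bLoop (bScan (board.headD []).length board 0 PySem.Dict.empty)
          ((board.length : Int) * (board.length : Int)) fuel r c v := by
  intro fuel
  induction fuel with
  | zero => intro v r c checked _ _ _ _ _ _ _; rfl
  | succ n ih =>
    intro v r c checked hr0 hr1 hc0 hc1 hval hsh hinv
    rw [tourLoopA, bLoop]
    rw [stepA_chain board checked v r c hrect hinv hr0 hr1 hc0 hc1]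
    rw [getD_bScan, stepB_chain board hrect v r c hr0 hr1 hc0 hc1 hval]
    cases hN : chain board v r c with
    | none => rfl
    | some p =>
      obtain ⟨nr, nc⟩ := p
      have hp := chain_some board v r c (nr, nc) hN
      simp only []
      rw [hp.2.2.2.2]
      by_cases hwin : v + 1 = (board.length : Int) * (board.length : Int)
      · rw [if_pos hwin, if_pos hwin]
      · rw [if_neg hwin, if_neg hwin]
        apply ih (v + 1) nr nc _ hp.1 hp.2.1 hp.2.2.1 hp.2.2.2.1 hp.2.2.2.2
          (shape_pvSet2 board checked nr nc 1 hsh)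
        intro i j hi0 hi1 hj0 hj1 hne
        rw [pvGet2_pvSet2 checked (board.headD []).length hsh.2 nr nc i j 1 hi0
            (by rw [hsh.1]; omega) hj0 hj1] at hne
        split_ifs at hne with hij
        · obtain ⟨hi, hj⟩ := hij
          subst hi hj
          exact le_of_eq hp.2.2.2.2
        · have := hinv i j hi0 hi1 hj0 hj1 hne
          omega

-- ===== find1 vs the index =====

def find1Pairs : List (Int × (Int × Int)) → (Bool × Option Int × Option Int) →
    Option (Bool × Option Int × Option Int)
  | [], st => some st
  | (v, (a, b)) :: rest, st =>
    if v = 0 then none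
    else if v = 1 then
      if st.1 = false then find1Pairs rest (true, some a, some b) else none
    else find1Pairs rest st

theorem find1Cols_pairs (r : Int) : ∀ (vals : List Int) (c : Int) st,
    find1Cols r vals c st = find1Pairs (bPairsRow r vals c) st := by
  intro vals
  induction vals with
  | nil => intro c st; rfl
  | cons v rest ih =>
    intro c st
    rw [find1Cols, bPairsRow, find1Pairs]
    by_cases h0 : v = 0
    · rw [if_pos h0, if_pos h0]
    · rw [if_neg h0, if_neg h0]
      by_cases h1 : v = 1
      · rw [if_pos h1, if_pos h1]
        by_cases hf : st.1 = false
        · rw [if_pos hf, if_pos hf, ih]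
        · rw [if_neg hf, if_neg hf]
      · rw [if_neg h1, if_neg h1, ih]

theorem find1Pairs_append : ∀ (l1 l2 : List (Int × (Int × Int))) st,
    find1Pairs (l1 ++ l2) st =
      (find1Pairs l1 st).bind (fun st' => find1Pairs l2 st') := by
  intro l1
  induction l1 with
  | nil => intro l2 st; rfl
  | cons p rest ih =>
    intro l2 st
    obtain ⟨v, a, b⟩ := p
    rw [List.cons_append, find1Pairs, find1Pairs]
    by_cases h0 : v = 0
    · rw [if_pos h0, if_pos h0]; rfl
    · rw [if_neg h0, if_neg h0]
      by_cases h1 : v = 1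
      · rw [if_pos h1, if_pos h1]
        by_cases hf : st.1 = false
        · rw [if_pos hf, if_pos hf, ih]
        · rw [if_neg hf, if_neg hf]; rfl
      · rw [if_neg h1, if_neg h1, ih]

theorem find1Rows_pairs (cols : Nat) : ∀ (l : List (List Int)) (r : Int) st,
    find1Rows cols l r st = find1Pairs (bPairs cols l r) st := by
  intro l
  induction l with
  | nil => intro r st; rfl
  | cons row rest ih =>
    intro r st
    rw [find1Rows, bPairs, find1Pairs_append, ← find1Cols_pairs]
    cases h : find1Cols r (row.take cols) 0 st with
    | none => rfl
    | some st' => exact ih (r + 1) st'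

def stOf (os : List (Int × Int)) : Bool × Option Int × Option Int :=
  match os with
  | [] => (false, none, none)
  | (a, b) :: _ => (true, some a, some b)

def onesOf (l : List (Int × (Int × Int))) : List (Int × Int) :=
  (l.filter (fun p => p.1 == 1)).map (·.2)

theorem find1Pairs_char : ∀ (l : List (Int × (Int × Int))) (os : List (Int × Int)),
    os.length ≤ 1 →
    find1Pairs l (stOf os) =
      if l.any (fun p => p.1 == 0) = true ∨ 2 ≤ (os ++ onesOf l).length then none
      else some (stOf (os ++ onesOf l)) := by
  intro l
  induction l with
  | nil =>
    intro os hos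
    rw [find1Pairs]
    simp only [onesOf, List.filter_nil, List.map_nil, List.append_nil, List.any_nil]
    rw [if_neg (by rintro (h | h); exacts [Bool.false_ne_true h, by omega])]
  | cons p rest ih =>
    intro os hos
    obtain ⟨v, a, b⟩ := p
    rw [find1Pairs]
    by_cases h0 : v = 0
    · rw [if_pos h0]
      rw [if_pos (Or.inl (by simp [h0]))]
    · rw [if_neg h0]
      have hz : ((v, (a, b)) :: rest).any (fun p => p.1 == 0) = rest.any (fun p => p.1 == 0) := by
        simp [h0]
      by_cases h1 : v = 1
      · rw [if_pos h1]
        have hones : onesOf ((v, (a, b)) :: rest) = (a, b) :: onesOf rest := by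
          unfold onesOf
          rw [List.filter_cons_of_pos (by simp [h1])]
          rfl
        cases os with
        | nil =>
          rw [if_pos (show (stOf []).1 = false from rfl)]
          rw [show ((true, some a, some b) : Bool × Option Int × Option Int) = stOf [(a, b)]
                from rfl]
          rw [ih [(a, b)] (by simp), hz, hones]
          simp
        | cons q tl =>
          obtain ⟨qa, qb⟩ := q
          rw [if_neg (show ¬ (stOf ((qa, qb) :: tl)).1 = false by simp [stOf])]
          rw [if_pos (Or.inr (by rw [hones]; simp; omega))]
      · rw [if_neg h1]
        have hones : onesOf ((v, (a, b)) :: rest) = onesOf rest := by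
          unfold onesOf
          rw [List.filter_cons_of_neg (by simp [h1])]
        rw [ih os hos, hz, hones]

-- ===== VERDICT (by name: the statement is the Claim_ definition above) =====
theorem isKingsTour_spec : Claim_equal_isKingsTour := by
  unfold Claim_equal_isKingsTour
  intro board _ hpre
  obtain ⟨hrect, hex⟩ := hpre
  unfold Spec_isKingsTour
  have hchar := find1Pairs_char (bPairs (board.headD []).length board 0) [] (by simp)
  rw [List.nil_append] at hchar
  unfold isKingsTour isKingsTour_alt find1
  rw [find1Rows_pairs]
  rw [show ((false, none, none) : Bool × Option Int × Option Int) = stOf [] from rfl, hchar]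
  dsimp only
  rw [getD_bScan, contains_bScan]
  have hones : onesOf (bPairs (board.headD []).length board 0) = posOf board 1 := rfl
  by_cases hcond : (bPairs (board.headD []).length board 0).any (fun p => p.1 == 0) = true ∨
      2 ≤ (onesOf (bPairs (board.headD []).length board 0)).length
  · rw [if_pos hcond]
    rcases hcond with hc | hc
    · have hg : (((bPairs (board.headD []).length board 0).any fun p => p.1 == 0) ||
          ((posOf board 1).length != 1)) = true := by rw [hc, Bool.true_or]
      rw [if_pos hg]
    · rw [hones] at hc
      have h1 : ((posOf board 1).length != 1) = true := by
        simp only [bne_iff_ne, ne_eq]; omega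
      have hg : (((bPairs (board.headD []).length board 0).any fun p => p.1 == 0) ||
          ((posOf board 1).length != 1)) = true := by rw [h1, Bool.or_true]
      rw [if_pos hg]
  · rw [if_neg hcond]
    have hnz : ¬ (bPairs (board.headD []).length board 0).any (fun p => p.1 == 0) = true :=
      fun h => hcond (Or.inl h)
    have hlen1 : (onesOf (bPairs (board.headD []).length board 0)).length < 2 :=
      by by_contra h; exact hcond (Or.inr (by omega))
    rw [hones] at hlen1
    have hnzb : (bPairs (board.headD []).length board 0).any (fun p => p.1 == 0) = false := by
      cases h : (bPairs (board.headD []).length board 0).any (fun p => p.1 == 0)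
      · rfl
      · exact absurd h hnz
    cases hos : posOf board 1 with
    | nil =>
      rw [hones, hos]
      have hg : (((bPairs (board.headD []).length board 0).any fun p => p.1 == 0) ||
          ((([] : List (Int × Int)).length != 1))) = true := by rw [hnzb]; rfl
      rw [if_pos hg]
      rfl
    | cons q tl =>
      obtain ⟨a, b⟩ := q
      have htl : tl = [] := by
        rw [hos] at hlen1; simp at hlen1; omega
      subst htl
      rw [hones, hos]
      have hg : ¬ ((((bPairs (board.headD []).length board 0).any fun p => p.1 == 0) ||
          (([(a, b)] : List (Int × Int)).length != 1)) = true) := by rw [hnzb]; simp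
      rw [if_neg hg]
      have hpos := posOf_mem board hrect 1 (a, b) (by rw [hos]; simp)
      obtain ⟨ha0, ha1, hb0, hb1, hval⟩ := hpos
      show tourLoopA board (makeFullBoard board) (board.length : Int)
          (board.length * (board.headD []).length + 1) (pvGet2 board a b) a b
          (pvSet2 (makeCheckedList board) a b 1) =
        bLoop (bScan (board.headD []).length board 0 PySem.Dict.empty)
          ((board.length : Int) * (board.length : Int))
          (board.length * (board.headD []).length + 1) a b 1
      rw [hval]
      exact loop_eq board hrect (board.length * (board.headD []).length + 1) 1 a b
        (pvSet2 (makeCheckedList board) a b 1) ha0 ha1 hb0 hb1 hval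
        (shape_pvSet2 board (makeCheckedList board) a b 1 (shape_makeCheckedList board))
        (by
          intro i j hi0 hi1 hj0 hj1 hne
          rw [pvGet2_pvSet2 (makeCheckedList board) (board.headD []).length
              (shape_makeCheckedList board).2 a b i j 1 hi0
              (by rw [(shape_makeCheckedList board).1]; omega) hj0 hj1] at hne
          split_ifs at hne with hij
          · obtain ⟨hi, hj⟩ := hij
            subst hi hj
            exact le_of_eq hval
          · exact absurd (pvGet2_makeCheckedList board i j hi0 hi1) hne)
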